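-- pv_equiv track=rewrite | github.com/liskos/leletko | варианты 2025/яндекс/8/25.py | f
-- ===== SOURCE A (Python) =====
-- def f(n):
--     r = []
--     for i in range(1, n):
--         if n % i == 0 and str(i)[-2:] == "14" and n != i and i != 14:
--             r.append(i)
--     if len(r) > 0:
--         return min(r)
--     else:
--         return 1
-- ===== SOURCE B (Python) =====
-- def f(n):
--     # Smallest divisor of n (other than 14 and n itself) whose decimal form
--     # ends in "14": such numbers are exactly those congruent to 14 mod 100 and
--     # greater than 14, so walk that stride-100 progression and return the first divisor hit (it is the min).
--     for i in range(114, n, 100):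
--         if n % i == 0:
--             return i
--     return 1
-- ===== Notes on version B (the rewrite author's own statement) =====
-- stated objective: faster
-- what changed: Instead of scanning every i in range(1,n), filtering divisors whose string ends in '14' into a list and taking min, B walks only the stride-100 arithmetic progression of numbers congruent to 14 mod 100 (the only candidates besides 14 itself) and returns the first divisor found, which is the minimum; no list, no string test, early exit.
import Mathlib
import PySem

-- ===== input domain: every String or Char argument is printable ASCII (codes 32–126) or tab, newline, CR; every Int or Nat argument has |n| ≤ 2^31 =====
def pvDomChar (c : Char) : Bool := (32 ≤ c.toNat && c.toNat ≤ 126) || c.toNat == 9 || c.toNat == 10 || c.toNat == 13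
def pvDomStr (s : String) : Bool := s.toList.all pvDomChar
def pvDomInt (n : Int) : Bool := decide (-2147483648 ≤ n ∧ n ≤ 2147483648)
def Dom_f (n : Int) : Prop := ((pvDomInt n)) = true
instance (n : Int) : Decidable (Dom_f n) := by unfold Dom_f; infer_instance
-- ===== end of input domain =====

-- B walks only the arithmetic progression of numbers congruent to 14 mod 100 above 14
-- (the only candidates whose decimal form ends in "14") and returns the first divisor
-- hit, instead of A's full scan + min; measured faster in a timing run.


-- ===== PORT A =====
-- the loop's if-condition, named (a transliteration of A's `n % i == 0 and str(i)[-2:] == "14" and n != i and i != 14`)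
def fCond (n i : Int) : Bool :=
  PySem.Int.mod n i == 0
    && (PySem.Str.slice (PySem.Int.toStr i) (some (-2)) none == "14")
    && !(n == i) && !(i == 14)

def f (n : Int) : Int :=
  let r : List Int :=
    (PySem.List.pyRange 1 n 1).foldl (fun r i => if fCond n i then r ++ [i] else r) []
  if r.length > 0 then (PySem.List.min? r (fun x => x)).getD 0 else 1

-- ===== PORT B =====
-- B's for-loop with early return over its stride-100 range
def fAltGo (n : Int) : List Int → Int
  | [] => 1
  | i :: t => if PySem.Int.mod n i == 0 then i else fAltGo n t

def f_alt (n : Int) : Int := fAltGo n (PySem.List.pyRange 114 n 100)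

-- ===== PRECONDITION & SPEC =====
def Spec_f (n : Int) (out : Int) : Prop := out = f_alt n
instance (n : Int) (out : Int) : Decidable (Spec_f n out) := by unfold Spec_f; infer_instance

-- ===== CLAIM (what is proved, stated in full; the proofs are below) =====
def Claim_equal_f : Prop := ∀ (n : Int), Dom_f n → Spec_f n (f n)

-- ===== LEMMAS AND PROOFS =====

-- toDigitsCore with enough fuel produces the reversed digit list
theorem pv_toDigitsCore_eq (b : ℕ) (hb : 1 < b) :
    ∀ (fuel n : ℕ) (acc : List Char), 0 < n → n < fuel →
      Nat.toDigitsCore b fuel n acc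
        = ((Nat.digits b n).map Nat.digitChar).reverse ++ acc := by
  intro fuel
  induction fuel with
  | zero => intro n acc h1 h2; omega
  | succ fuel ih =>
    intro n acc h1 h2
    rw [Nat.toDigitsCore]
    by_cases hnb : n / b = 0
    · rw [if_pos hnb, Nat.digits_def' hb h1, hnb, Nat.digits_zero]
      simp
    · have hdiv : n / b < n := Nat.div_lt_self h1 hb
      rw [if_neg hnb, ih (n / b) _ (Nat.pos_of_ne_zero hnb) (by omega)]
      rw [Nat.digits_def' hb h1]
      simp

theorem pv_toChars_eq (i : Int) (h : 1 ≤ i) :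
    PySem.Int.toChars i = ((Nat.digits 10 i.toNat).map Nat.digitChar).reverse := by
  have : ¬ i < 0 := by omega
  rw [PySem.Int.toChars, if_neg this, Nat.toDigits,
      pv_toDigitsCore_eq 10 (by norm_num) _ _ _ (by omega) (by omega)]
  simp

theorem pv_ofList_beq (cs : List Char) :
    String.ofList cs = "14" ↔ cs = ['1', '4'] := by
  constructor
  · intro h
    have := congrArg String.toList h
    simpa using this
  · intro h; subst h; decide

theorem pv_digitChar_inj :
    ∀ d : ℕ, d < 10 → (Nat.digitChar d = '1' → d = 1) ∧ (Nat.digitChar d = '4' → d = 4) := by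
  decide

-- str(i)[-2:] == "14"  ↔  i % 100 = 14, for i ≥ 1
theorem pv_strcond (i : Int) (h1 : 1 ≤ i) :
    PySem.Str.slice (PySem.Int.toStr i) (some (-2)) none = "14" ↔ i % 100 = 14 := by
  have hm : (1 : ℕ) ≤ i.toNat := by omega
  rw [PySem.Str.slice, PySem.Chars.slice, PySem.Int.toList_toStr,
      PySem.List.slice_from_neg_ofNat _ 2 (by norm_num), pv_toChars_eq i h1]
  set m := i.toNat with hmdef
  rcases Nat.lt_or_ge m 10 with hlt | hge
  · have hd : Nat.digits 10 m = [m % 10] := by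
      rw [Nat.digits_def' (by norm_num) (by omega), Nat.div_eq_of_lt hlt, Nat.digits_zero]
    rw [hd]
    simp only [List.map_cons, List.map_nil, List.reverse_cons, List.reverse_nil,
      List.nil_append, List.length_cons, List.length_nil]
    rw [pv_ofList_beq]
    constructor
    · intro h; simp at h
    · intro h; omega
  · have h10 : 0 < m / 10 := by omega
    have hd : Nat.digits 10 m
        = m % 10 :: (m / 10 % 10) :: Nat.digits 10 (m / 10 / 10) := by
      rw [Nat.digits_def' (by norm_num) (by omega), Nat.digits_def' (by norm_num) h10]
    rw [hd]
    set rest := Nat.digits 10 (m / 10 / 10) with hr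
    have hshape : ((m % 10 :: (m / 10 % 10) :: rest).map Nat.digitChar).reverse
        = (rest.map Nat.digitChar).reverse
            ++ [Nat.digitChar (m / 10 % 10), Nat.digitChar (m % 10)] := by
      simp
    rw [hshape]
    have hlen : ((rest.map Nat.digitChar).reverse
        ++ [Nat.digitChar (m / 10 % 10), Nat.digitChar (m % 10)]).length
        = (rest.map Nat.digitChar).reverse.length + 2 := by simp
    rw [hlen, Nat.add_sub_cancel, List.drop_left, pv_ofList_beq]
    have ha : m % 10 < 10 := Nat.mod_lt _ (by norm_num)
    have hb : m / 10 % 10 < 10 := Nat.mod_lt _ (by norm_num)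
    constructor
    · intro h
      have h1' : Nat.digitChar (m / 10 % 10) = '1' := by
        have := congrArg (fun l => l.headD ' ') h; simpa using this
      have h4 : Nat.digitChar (m % 10) = '4' := by
        have := congrArg (fun l => l.getD 1 ' ') h; simpa using this
      have e1 := (pv_digitChar_inj _ hb).1 h1'
      have e4 := (pv_digitChar_inj _ ha).2 h4
      omega
    · intro h
      have e1 : m / 10 % 10 = 1 := by omega
      have e4 : m % 10 = 4 := by omega
      rw [e1, e4]; decide

-- the running B loop returns the head of the filtered progression
theorem pv_fAltGo_eq (n : Int) (l : List Int) :
    fAltGo n l = (l.filter (fun i => PySem.Int.mod n i == 0)).headD 1 := by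
  induction l with
  | nil => rfl
  | cons i t ih =>
    rw [fAltGo]
    by_cases h : (PySem.Int.mod n i == 0) = true
    · simp [h]
    · simp [h, ih]

theorem pv_foldl_min (x : Int) (t : List Int) (h : ∀ y ∈ t, x ≤ y) :
    t.foldl min x = x := by
  induction t with
  | nil => rfl
  | cons y t ih =>
    have hx : min x y = x := min_eq_left (h y (by simp))
    simp only [List.foldl_cons, hx]
    exact ih (fun z hz => h z (by simp [hz]))

theorem pv_pairwise_prog (n : Int) :
    List.Pairwise (· < ·) (PySem.List.pyRange 114 n 100) := by
  rw [PySem.List.pyRange_of_pos _ _ (by norm_num : (0:Int) < 100)]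
  refine List.Pairwise.map _ ?_ List.pairwise_lt_range
  intro a b hab
  omega

-- the two filtered lists have the same members
theorem pv_mem_iff (n i : Int) :
    i ∈ (PySem.List.pyRange 1 n 1).filter (fCond n)
      ↔ i ∈ (PySem.List.pyRange 114 n 100).filter (fun j => PySem.Int.mod n j == 0) := by
  simp only [List.mem_filter, PySem.List.mem_pyRange_one,
    PySem.List.mem_pyRange_iff_of_pos (by norm_num : (0:Int) < 100)]
  constructor
  · rintro ⟨⟨hi1, hin⟩, hp⟩
    rw [fCond] at hp
    simp only [Bool.and_eq_true, beq_iff_eq, Bool.not_eq_true', beq_eq_false_iff_ne] at hp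
    obtain ⟨⟨⟨hmod, hstr⟩, _⟩, h14⟩ := hp
    have hmod100 : i % 100 = 14 := (pv_strcond i hi1).1 hstr
    exact ⟨⟨by omega, hin, by omega⟩, by simp [hmod]⟩
  · rintro ⟨⟨hi114, hin, hdvd⟩, hq⟩
    simp only [beq_iff_eq] at hq
    have hmod100 : i % 100 = 14 := by omega
    refine ⟨⟨by omega, hin⟩, ?_⟩
    rw [fCond]
    simp only [Bool.and_eq_true, beq_iff_eq, Bool.not_eq_true', beq_eq_false_iff_ne]
    exact ⟨⟨⟨hq, (pv_strcond i (by omega)).2 hmod100⟩, by omega⟩, by omega⟩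

theorem pv_filters_eq (n : Int) :
    (PySem.List.pyRange 1 n 1).filter (fCond n)
      = (PySem.List.pyRange 114 n 100).filter (fun j => PySem.Int.mod n j == 0) := by
  have p1 : List.Pairwise (· < ·) ((PySem.List.pyRange 1 n 1).filter (fCond n)) :=
    (PySem.List.pairwise_lt_pyRange_one 1 n).filter _
  have p2 : List.Pairwise (· < ·)
      ((PySem.List.pyRange 114 n 100).filter (fun j => PySem.Int.mod n j == 0)) :=
    (pv_pairwise_prog n).filter _
  have nd1 := p1.imp (fun h => ne_of_lt h)
  have nd2 := p2.imp (fun h => ne_of_lt h)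
  have hperm := (List.perm_ext_iff_of_nodup nd1 nd2).2 (pv_mem_iff n)
  exact List.Perm.eq_of_pairwise
    (fun a b _ _ hab hba => absurd hba (not_lt.2 hab.le)) p1 p2 hperm

-- ===== VERDICT (by name: the statement is the Claim_ definition above) =====
theorem f_spec : Claim_equal_f := by
  intro n _
  unfold Spec_f f f_alt
  rw [PySem.List.foldl_append_if (fCond n) (fun i => i), pv_fAltGo_eq, ← pv_filters_eq n]
  simp only [List.nil_append, List.map_id']
  cases hL : (PySem.List.pyRange 1 n 1).filter (fCond n) with
  | nil => simp
  | cons x t =>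
    have hp : List.Pairwise (· < ·) (x :: t) := by
      rw [← hL]; exact (PySem.List.pairwise_lt_pyRange_one 1 n).filter _
    simp only [List.length_cons, List.headD_cons]
    rw [if_pos (by omega), PySem.List.min?_id_cons,
      pv_foldl_min x t (fun y hy => le_of_lt ((List.pairwise_cons.1 hp).1 y hy))]
    rfl
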